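-- pv_equiv track=rewrite | github.com/CodingTest-lab/Algorithm.Prac | 프로그래머스/unrated/120843. 공 던지기/공 던지기.py | solution
-- ===== SOURCE A (Python) =====
-- def solution(numbers, k):
--     result = numbers[0] + ((k - 1) * 2)
--     for _ in range(500):
--         if result > len(numbers):
--             result -= len(numbers)
--         elif result <= len(numbers):
--             return result
--         else:
--             return result
-- ===== SOURCE B (Python) =====
-- def solution(numbers, k):
--     n = len(numbers)
--     r = numbers[0] + (k - 1) * 2
--     return r if r <= n else (r - 1) % n + 1
-- ===== Notes on version B (the rewrite author's own statement) =====
-- stated objective: simpler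
-- what changed: Replaces the bounded 500-iteration repeated-subtraction loop with a closed-form modulo reduction ((r-1) % n + 1).
-- outside the precondition, e.g. on solution([1], 2000): A returns None, B returns 1
import Mathlib
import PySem

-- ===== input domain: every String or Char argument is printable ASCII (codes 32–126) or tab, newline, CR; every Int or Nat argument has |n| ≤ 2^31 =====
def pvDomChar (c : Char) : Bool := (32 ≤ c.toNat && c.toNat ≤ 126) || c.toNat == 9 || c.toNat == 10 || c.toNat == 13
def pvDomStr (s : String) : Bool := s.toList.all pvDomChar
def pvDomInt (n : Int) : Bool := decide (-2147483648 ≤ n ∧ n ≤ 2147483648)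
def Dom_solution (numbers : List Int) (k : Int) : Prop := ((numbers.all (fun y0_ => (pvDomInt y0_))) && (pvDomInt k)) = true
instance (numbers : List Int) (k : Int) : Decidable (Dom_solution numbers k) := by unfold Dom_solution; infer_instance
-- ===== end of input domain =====

-- B replaces A's 500-iteration repeated-subtraction loop by a closed-form modulo reduction.

-- ===== PORT A =====
-- the 'for _ in range(500)' loop: each iteration either subtracts len(numbers) or returns;
-- falling off the loop returns Python None (no Int value) — excluded by Pre_solution, 0 is a placeholder
def solGo : Nat → Int → Int → Int
  | 0, _, _ => 0
  | f + 1, n, result => if result > n then solGo f n (result - n) else result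

def solution (numbers : List Int) (k : Int) : Int :=
  match PySem.List.pyGet? numbers 0 with
  | none => 0  -- numbers[0] raises IndexError on []; excluded by Pre_solution
  | some h => solGo 500 (numbers.length : Int) (h + (k - 1) * 2)

-- ===== PORT B =====
def solution_alt (numbers : List Int) (k : Int) : Int :=
  let n : Int := numbers.length
  match PySem.List.pyGet? numbers 0 with
  | none => 0  -- numbers[0] raises IndexError on []; excluded by Pre_solution
  | some h =>
    let r := h + (k - 1) * 2
    if r ≤ n then r else PySem.Int.mod (r - 1) n + 1

-- ===== PRECONDITION & SPEC =====
-- Pre_ excludes [] (numbers[0] raises IndexError) and inputs whose start value exceeds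
-- 500*len(numbers), on which A's loop cap makes it fall through and return None (not an Int).
def Pre_solution (numbers : List Int) (k : Int) : Prop :=
  numbers ≠ [] ∧ numbers.headD 0 + (k - 1) * 2 ≤ 500 * (numbers.length : Int)
instance (numbers : List Int) (k : Int) : Decidable (Pre_solution numbers k) := by
  unfold Pre_solution; infer_instance
def pvWitness_solution : List Int × Int := ([1, 2, 3], 2)

def Spec_solution (numbers : List Int) (k : Int) (out : Int) : Prop := out = solution_alt numbers k
instance (numbers : List Int) (k : Int) (out : Int) : Decidable (Spec_solution numbers k out) := by
  unfold Spec_solution; infer_instance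

-- ===== CLAIM (what is proved, stated in full; the proofs are below) =====
def Claim_equal_solution : Prop := ∀ (numbers : List Int) (k : Int), Dom_solution numbers k → Pre_solution numbers k → Spec_solution numbers k (solution numbers k)

-- ===== LEMMAS AND PROOFS =====
theorem solGo_closed (fuel : Nat) (n : Int) (hn : 1 ≤ n) :
    ∀ r : Int, r ≤ (fuel : Int) * n + n →
      solGo (fuel + 1) n r = if r ≤ n then r else PySem.Int.mod (r - 1) n + 1 := by
  induction fuel with
  | zero =>
    intro r hr
    norm_num at hr
    simp only [solGo]
    rw [if_neg (by omega), if_pos hr]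
  | succ f ih =>
    intro r hr
    push_cast at hr
    have hstep : solGo (f + 1 + 1) n r = if r > n then solGo (f + 1) n (r - n) else r := rfl
    rw [hstep]
    by_cases hgt : r > n
    · rw [if_pos hgt]
      have hr' : r - n ≤ (f : Int) * n + n := by nlinarith
      rw [ih (r - n) hr']
      by_cases h2 : r - n ≤ n
      · rw [if_pos h2, if_neg (by omega)]
        rw [PySem.Int.mod_eq_emod_of_pos (by omega)]
        have hper : (r - 1) % n = r - 1 - n := by
          have h1 := Int.sub_emod_right (r - 1) n
          rw [← h1, Int.emod_eq_of_lt (by omega) (by omega)]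
        omega
      · rw [if_neg h2, if_neg (by omega)]
        rw [PySem.Int.mod_eq_emod_of_pos (by omega),
            PySem.Int.mod_eq_emod_of_pos (by omega)]
        have hx : r - n - 1 = (r - 1) - n := by ring
        rw [hx, Int.sub_emod_right]
    · rw [if_neg hgt, if_pos (by omega)]

-- ===== VERDICT (by name: the statement is the Claim_ definition above) =====
theorem solution_spec : Claim_equal_solution := by
  intro numbers k _ hpre
  obtain ⟨hne, hle⟩ := hpre
  unfold Spec_solution solution solution_alt
  cases numbers with
  | nil => exact absurd rfl hne
  | cons h t =>
    have hget : PySem.List.pyGet? (h :: t) 0 = some h := by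
      simp [PySem.List.pyGet?, PySem.List.pyIdx?]
    simp only [List.headD] at hle
    have hn : 1 ≤ ((h :: t).length : Int) := by simp
    have hh : ((499 : Nat) : Int) * ((h :: t).length : Int) + ((h :: t).length : Int)
        = 500 * ((h :: t).length : Int) := by push_cast; ring
    have hmain := solGo_closed 499 ((h :: t).length : Int) hn (h + (k - 1) * 2) (by omega)
    simp only [hget]
    simpa using hmain
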